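-- pv_equiv track=rewrite | github.com/SlavikMironov/adventofcode | 2023/day 21/day21.py | part_one
-- ===== SOURCE A (Python) =====
-- from collections import deque, defaultdict
--
-- def get_s(maze):
--     for row in range(len(maze)):
--         for col in range(len(maze[0])):
--             if maze[row][col] == "S":
--                 return row, col
--
-- def part_one(maze):
--     sr, sc = get_s(maze)
--     visited = set((sr, sc))
--     queue = deque([((sr, sc), 0)])
--     points = defaultdict(int)
--
--     while queue:
--         (row, col), distance_from_s = queue.popleft()
--
--         for dr, dc in [(1, 0), (-1, 0), (0, 1), (0, -1)]:
--             nr, nc = row + dr, col + dc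
--             if (
--                 0 <= nr < len(maze)
--                 and 0 <= nc < len(maze[0])
--                 and maze[nr][nc] != "#"
--                 and (nr, nc) not in visited
--             ):
--                 visited.add((nr, nc))
--                 queue.append(((nr, nc), distance_from_s + 1))
--                 points[distance_from_s + 1] += 1
--
--     return sum(val for key, val in points.items() if key <= 64 and key % 2 == 0)
-- ===== SOURCE B (Python) =====
-- def part_one(maze):
--     rows, cols = len(maze), len(maze[0])
--     start = next((r, c) for r in range(rows) for c in range(cols) if maze[r][c] == "S")
--     visited = set()
--     frontier = {start}
--     total = 0
--     for d in range(1, 65):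
--         if not frontier:
--             break
--         nxt = set()
--         for r, c in frontier:
--             for n in ((r + 1, c), (r - 1, c), (r, c + 1), (r, c - 1)):
--                 if 0 <= n[0] < rows and 0 <= n[1] < cols and maze[n[0]][n[1]] != "#" and n not in visited:
--                     nxt.add(n)
--         visited |= nxt
--         frontier = nxt
--         if d % 2 == 0:
--             total += len(nxt)
--     return total
-- ===== Notes on version B (the rewrite author's own statement) =====
-- stated objective: alternative
-- what changed: Replaces the per-node deque BFS with a distance dict tally by a level-synchronized BFS: a frontier set is expanded whole layers at a time for at most 64 steps, adding each even layer's size to a running total (like A, the start cell is not pre-marked visited, so it is re-counted at step 2).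
-- outside the precondition, e.g. on part_one(['S#', '#']): A returns 0, B returns 0
import Mathlib
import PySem

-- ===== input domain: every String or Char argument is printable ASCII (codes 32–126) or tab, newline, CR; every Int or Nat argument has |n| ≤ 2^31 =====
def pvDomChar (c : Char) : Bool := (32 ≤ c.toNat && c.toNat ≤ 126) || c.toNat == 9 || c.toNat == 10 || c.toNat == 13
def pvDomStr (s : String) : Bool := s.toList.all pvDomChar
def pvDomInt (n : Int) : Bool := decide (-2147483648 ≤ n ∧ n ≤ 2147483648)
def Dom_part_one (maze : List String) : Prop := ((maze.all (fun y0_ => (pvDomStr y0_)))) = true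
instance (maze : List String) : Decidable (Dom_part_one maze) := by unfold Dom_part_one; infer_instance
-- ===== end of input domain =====

-- B re-implements A's per-node deque BFS as a level-synchronized frontier BFS capped at 64 steps,
-- summing the sizes of the even layers directly (return-value equivalence; neither mutates its input).

-- maze[r][c] (both Pythons index the same way; '!' is returned only outside Pre_, where Python raises)
def pvCell (maze : List String) (r c : Int) : Char :=
  (PySem.Str.pyGet? (PySem.List.pyGetD maze r "") c).getD '!'

-- ===== PORT A =====
-- get_s: scan rows, then cols in range(len(maze[0])), first 'S' (None when absent — Python then raises in part_one)
def getS (maze : List String) : Option (Nat × Nat) :=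
  (List.range maze.length).findSome? (fun r =>
    ((List.range (maze.headD "").length).find? (fun c => pvCell maze (Int.ofNat r) (Int.ofNat c) == 'S')).map (fun c => (r, c)))

def dirsA : List (Int × Int) := [(1, 0), (-1, 0), (0, 1), (0, -1)]

-- one popped queue entry: the for-loop over the four directions, threading (queue-tail, visited, points)
def stepA (maze : List String) (rows cols : Int) (rc : Int × Int) (d : Int)
    (st : List ((Int × Int) × Int) × PySem.Set (Int × Int) × PySem.Dict Int Int) :
    List ((Int × Int) × Int) × PySem.Set (Int × Int) × PySem.Dict Int Int :=
  dirsA.foldl (fun st dd =>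
    let n : Int × Int := (rc.1 + dd.1, rc.2 + dd.2)
    if 0 ≤ n.1 ∧ n.1 < rows ∧ 0 ≤ n.2 ∧ n.2 < cols ∧ pvCell maze n.1 n.2 ≠ '#' ∧
        PySem.Set.contains st.2.1 n = false
    then (st.1 ++ [(n, d + 1)], PySem.Set.add st.2.1 n, PySem.Dict.modify st.2.2 (d + 1) 0 (· + 1))
    else st) st

-- the while queue loop; fuel bounds the number of pops (each pop after the first added a fresh in-grid
-- cell to visited, so rows*cols+1 pops never run out inside Pre_ — proved below, not assumed)
def bfsA (maze : List String) (rows cols : Int) :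
    Nat → List ((Int × Int) × Int) → PySem.Set (Int × Int) → PySem.Dict Int Int → PySem.Dict Int Int
  | 0, _, _, pts => pts
  | _ + 1, [], _, pts => pts
  | fuel + 1, (rc, d) :: rest, vis, pts =>
    let st := stepA maze rows cols rc d (rest, vis, pts)
    bfsA maze rows cols fuel st.1 st.2.1 st.2.2

def part_one (maze : List String) : Int :=
  let rows : Int := maze.length
  let cols : Int := (maze.headD "").length
  match getS maze with
  | none => 0   -- Python raises TypeError here (no 'S'); excluded by Pre_part_one
  | some (sr, sc) =>
    -- Python's `visited = set((sr, sc))` is the set of the two INTEGERS sr and sc, which no (nr, nc)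
    -- PAIR membership test ever matches; it is ported as the empty set of pairs (exact).
    let pts := bfsA maze rows cols (rows.toNat * cols.toNat + 1)
      [(((sr : Int), (sc : Int)), 0)] PySem.Set.empty PySem.Dict.empty
    pts.items.foldl (fun a kv => if kv.1 ≤ 64 ∧ kv.1 % 2 = 0 then a + kv.2 else a) 0

-- ===== PORT B =====
def pvNeighbors (rc : Int × Int) : List (Int × Int) :=
  [(rc.1 + 1, rc.2), (rc.1 - 1, rc.2), (rc.1, rc.2 + 1), (rc.1, rc.2 - 1)]

-- next frontier: all unvisited in-bounds non-'#' neighbours of the frontier, as a set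
def nextB (maze : List String) (rows cols : Int) (vis frontier : PySem.Set (Int × Int)) :
    PySem.Set (Int × Int) :=
  frontier.foldl (fun nxt rc =>
    (pvNeighbors rc).foldl (fun nxt n =>
      if 0 ≤ n.1 ∧ n.1 < rows ∧ 0 ≤ n.2 ∧ n.2 < cols ∧ pvCell maze n.1 n.2 ≠ '#' ∧
          PySem.Set.contains vis n = false
      then PySem.Set.add nxt n else nxt) nxt) PySem.Set.empty

-- for d in range(1, 65): advance one whole layer, counting even layers
def loopB (maze : List String) (rows cols : Int) :
    Nat → Int → PySem.Set (Int × Int) → PySem.Set (Int × Int) → Int → Int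
  | 0, _, _, _, total => total
  | k + 1, d, vis, frontier, total =>
    if frontier.isEmpty then total
    else
      let nxt := nextB maze rows cols vis frontier
      loopB maze rows cols k (d + 1) (PySem.Set.union vis nxt) nxt
        (if d % 2 = 0 then total + (nxt.length : Int) else total)

-- next((r, c) for r in range(rows) for c in range(cols) if maze[r][c] == "S")
def findS (maze : List String) : Option (Nat × Nat) :=
  ((List.range maze.length).flatMap (fun r =>
      (List.range (maze.headD "").length).map (fun c => (r, c)))).find?
    (fun rc => pvCell maze (Int.ofNat rc.1) (Int.ofNat rc.2) == 'S')

def part_one_alt (maze : List String) : Int :=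
  let rows : Int := maze.length
  let cols : Int := (maze.headD "").length
  match findS maze with
  | none => 0   -- Python B raises StopIteration here; excluded by Pre_part_one
  | some (sr, sc) =>
    loopB maze rows cols 64 1 PySem.Set.empty (PySem.Set.ofList [((sr : Int), (sc : Int))]) 0

-- ===== PRECONDITION & SPEC =====
-- Pre_ excludes exactly the inputs where Python A raises: the empty maze / no 'S' within the first
-- len(maze[0]) columns (TypeError unpacking None) and ragged mazes with a row shorter than row 0
-- (potential IndexError while scanning or stepping); on such short-row inputs that A happens to
-- survive (the short region unreachable) both programs return the same value anyway.
def Pre_part_one (maze : List String) : Prop :=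
  maze ≠ [] ∧ (∀ s ∈ maze, (maze.headD "").length ≤ s.length) ∧
    (∃ s ∈ maze, 'S' ∈ s.toList.take (maze.headD "").length)
instance (maze : List String) : Decidable (Pre_part_one maze) := by
  unfold Pre_part_one; infer_instance

def pvWitness_part_one : List String := ["S.", ".#"]

def Spec_part_one (maze : List String) (out : Int) : Prop := out = part_one_alt maze
instance (maze : List String) (out : Int) : Decidable (Spec_part_one maze out) := by
  unfold Spec_part_one; infer_instance

-- ===== CLAIM (what is proved, stated in full; the proofs are below) =====
def Claim_equal_part_one : Prop :=
  ∀ (maze : List String), Dom_part_one maze → Pre_part_one maze →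
    Spec_part_one maze (part_one maze)

-- ===== LEMMAS AND PROOFS =====

-- ========== proof-side definitions ==========

def bStep (maze : List String) (rows cols : Int) (vis : List (Int × Int))
    (nxt : List (Int × Int)) (n : Int × Int) : List (Int × Int) :=
  if 0 ≤ n.1 ∧ n.1 < rows ∧ 0 ≤ n.2 ∧ n.2 < cols ∧ pvCell maze n.1 n.2 ≠ '#' ∧
      PySem.Set.contains vis n = false
  then PySem.Set.add nxt n else nxt

def innerB (maze : List String) (rows cols : Int) (vis nxt : List (Int × Int))
    (rc : Int × Int) : List (Int × Int) :=
  (pvNeighbors rc).foldl (bStep maze rows cols vis) nxt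

def aStep (maze : List String) (rows cols : Int) (d : Int)
    (st : List ((Int × Int) × Int) × PySem.Set (Int × Int) × PySem.Dict Int Int)
    (n : Int × Int) :
    List ((Int × Int) × Int) × PySem.Set (Int × Int) × PySem.Dict Int Int :=
  if 0 ≤ n.1 ∧ n.1 < rows ∧ 0 ≤ n.2 ∧ n.2 < cols ∧ pvCell maze n.1 n.2 ≠ '#' ∧
      PySem.Set.contains st.2.1 n = false
  then (st.1 ++ [(n, d + 1)], PySem.Set.add st.2.1 n, PySem.Dict.modify st.2.2 (d + 1) 0 (· + 1))
  else st

theorem nextB_eq (maze : List String) (rows cols : Int) (vis F : List (Int × Int)) :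
    nextB maze rows cols vis F = F.foldl (innerB maze rows cols vis) [] := rfl

theorem stepA_eq (maze : List String) (rows cols : Int) (rc : Int × Int) (d : Int) st :
    stepA maze rows cols rc d st = (pvNeighbors rc).foldl (aStep maze rows cols d) st := by
  have h2 : dirsA.map (fun dd => (rc.1 + dd.1, rc.2 + dd.2)) = pvNeighbors rc := by
    simp [dirsA, pvNeighbors, sub_eq_add_neg]
  rw [← h2, List.foldl_map]
  rfl

theorem contains_append (s t : List (Int × Int)) (x : Int × Int) :
    PySem.Set.contains (s ++ t) x = (PySem.Set.contains s x || PySem.Set.contains t x) := by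
  simp [PySem.Set.contains]

theorem contains_false_iff (s : List (Int × Int)) (x : Int × Int) :
    PySem.Set.contains s x = false ↔ x ∉ s := by
  simp [PySem.Set.contains]

theorem add_of_not_contains (s : List (Int × Int)) (x : Int × Int)
    (h : PySem.Set.contains s x = false) : PySem.Set.add s x = s ++ [x] := by
  simp [PySem.Set.add]
  exact (contains_false_iff s x).mp h

theorem add_of_contains (s : List (Int × Int)) (x : Int × Int)
    (h : PySem.Set.contains s x = true) : PySem.Set.add s x = s := by
  simp [PySem.Set.add]
  simpa [PySem.Set.contains] using h

theorem bStep_prefix (maze : List String) (rows cols : Int) (vis nxt : List (Int × Int))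
    (n : Int × Int) : nxt <+: bStep maze rows cols vis nxt n := by
  unfold bStep
  split
  · by_cases h : PySem.Set.contains nxt n = true
    · rw [add_of_contains _ _ h]
    · rw [add_of_not_contains _ _ (by simpa using h)]; exact ⟨[n], rfl⟩
  · exact List.prefix_rfl

theorem bStep_fold_prefix (maze : List String) (rows cols : Int) (vis : List (Int × Int)) :
    ∀ (ns : List (Int × Int)) (nxt : List (Int × Int)),
      nxt <+: ns.foldl (bStep maze rows cols vis) nxt := by
  intro ns
  induction ns with
  | nil => intro nxt; exact List.prefix_rfl
  | cons n ns ih =>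
    intro nxt
    exact (bStep_prefix maze rows cols vis nxt n).trans (ih _)

theorem aStep_fold (maze : List String) (rows cols : Int) (d : Int) :
    ∀ (ns : List (Int × Int)) (q : List ((Int × Int) × Int)) (vis nxt : List (Int × Int))
      (pts : PySem.Dict Int Int),
      ns.foldl (aStep maze rows cols d) (q, vis ++ nxt, pts)
      = (q ++ ((ns.foldl (bStep maze rows cols vis) nxt).drop nxt.length).map (fun n => (n, d + 1)),
         vis ++ ns.foldl (bStep maze rows cols vis) nxt,
         (List.replicate ((ns.foldl (bStep maze rows cols vis) nxt).length - nxt.length) (d + 1)).foldl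
           (fun p k => PySem.Dict.modify p k 0 (· + 1)) pts) := by
  intro ns
  induction ns with
  | nil =>
    intro q vis nxt pts
    simp [List.drop_length]
  | cons n ns ih =>
    intro q vis nxt pts
    simp only [List.foldl_cons]
    by_cases hb : (0 ≤ n.1 ∧ n.1 < rows ∧ 0 ≤ n.2 ∧ n.2 < cols ∧ pvCell maze n.1 n.2 ≠ '#')
    · by_cases hv : PySem.Set.contains vis n = true
      · -- already visited before this level: both sides idle
        have hA : aStep maze rows cols d (q, vis ++ nxt, pts) n = (q, vis ++ nxt, pts) := by
          unfold aStep
          rw [if_neg]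
          simp only [contains_append, hv, Bool.true_or]
          tauto
        have hB : bStep maze rows cols vis nxt n = nxt := by
          unfold bStep
          rw [if_neg]
          simp only [hv]
          tauto
        rw [hA, hB, ih]
      · have hv' : PySem.Set.contains vis n = false := by simpa using hv
        by_cases hn : PySem.Set.contains nxt n = true
        · -- already in the next frontier: A idle, B's add is a no-op
          have hA : aStep maze rows cols d (q, vis ++ nxt, pts) n = (q, vis ++ nxt, pts) := by
            unfold aStep
            rw [if_neg]
            simp only [contains_append, hn, Bool.or_true]
            tauto
          have hB : bStep maze rows cols vis nxt n = nxt := by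
            unfold bStep
            split
            · exact add_of_contains nxt n hn
            · rfl
          rw [hA, hB, ih]
        · -- fresh cell: both sides append it
          have hn' : PySem.Set.contains nxt n = false := by simpa using hn
          have hvn : PySem.Set.contains (vis ++ nxt) n = false := by
            rw [contains_append, hv', hn']; rfl
          obtain ⟨h1, h2, h3, h4, h5⟩ := hb
          have hA : aStep maze rows cols d (q, vis ++ nxt, pts) n
              = (q ++ [(n, d + 1)], vis ++ (nxt ++ [n]), PySem.Dict.modify pts (d + 1) 0 (· + 1)) := by
            unfold aStep
            rw [if_pos ⟨h1, h2, h3, h4, h5, hvn⟩, add_of_not_contains _ _ hvn, List.append_assoc]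
          have hB : bStep maze rows cols vis nxt n = nxt ++ [n] := by
            unfold bStep
            rw [if_pos ⟨h1, h2, h3, h4, h5, hv'⟩, add_of_not_contains _ _ hn']
          rw [hA, hB, ih]
          obtain ⟨t, ht⟩ := bStep_fold_prefix maze rows cols vis ns (nxt ++ [n])
          rw [← ht]
          have hd1 : ((nxt ++ [n]) ++ t).drop nxt.length = [n] ++ t := by
            rw [List.append_assoc]; simp
          have hd2 : ((nxt ++ [n]) ++ t).drop (nxt ++ [n]).length = t := by simp
          have hl : ((nxt ++ [n]) ++ t).length - nxt.length = t.length + 1 := by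
            simp only [List.length_append, List.length_cons, List.length_nil]; omega
          have hl2 : ((nxt ++ [n]) ++ t).length - (nxt ++ [n]).length = t.length := by
            simp only [List.length_append, List.length_cons, List.length_nil]; omega
          rw [hd1, hd2, hl, hl2, List.replicate_succ]
          simp
    · -- out of bounds or a wall: both sides idle
      have hA : aStep maze rows cols d (q, vis ++ nxt, pts) n = (q, vis ++ nxt, pts) := by
        unfold aStep
        rw [if_neg]
        tauto
      have hB : bStep maze rows cols vis nxt n = nxt := by
        unfold bStep
        rw [if_neg]
        tauto
      rw [hA, hB, ih]

theorem bfsA_nil (maze : List String) (rows cols : Int) (fuel : Nat)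
    (vis : PySem.Set (Int × Int)) (pts : PySem.Dict Int Int) :
    bfsA maze rows cols fuel [] vis pts = pts := by
  cases fuel <;> rfl

theorem innerB_fold_prefix (maze : List String) (rows cols : Int) (vis : List (Int × Int)) :
    ∀ (F : List (Int × Int)) (nxt : List (Int × Int)),
      nxt <+: F.foldl (innerB maze rows cols vis) nxt := by
  intro F
  induction F with
  | nil => intro nxt; exact List.prefix_rfl
  | cons f F ih =>
    intro nxt
    exact (bStep_fold_prefix maze rows cols vis (pvNeighbors f) nxt).trans (ih _)

theorem replicate_fold_compose (a b : Nat) (k : Int) (pts : PySem.Dict Int Int) :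
    (List.replicate b k).foldl (fun p k => PySem.Dict.modify p k 0 (· + 1))
      ((List.replicate a k).foldl (fun p k => PySem.Dict.modify p k 0 (· + 1)) pts)
    = (List.replicate (a + b) k).foldl (fun p k => PySem.Dict.modify p k 0 (· + 1)) pts := by
  rw [List.replicate_add, List.foldl_append]

theorem levelA (maze : List String) (rows cols : Int) :
    ∀ (F : List (Int × Int)) (nxt vis : List (Int × Int)) (pts : PySem.Dict Int Int)
      (d : Int) (fuel : Nat),
      bfsA maze rows cols (fuel + F.length)
        (F.map (fun c => (c, d)) ++ nxt.map (fun c => (c, d + 1))) (vis ++ nxt) pts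
      = bfsA maze rows cols fuel
          ((F.foldl (innerB maze rows cols vis) nxt).map (fun c => (c, d + 1)))
          (vis ++ F.foldl (innerB maze rows cols vis) nxt)
          ((List.replicate ((F.foldl (innerB maze rows cols vis) nxt).length - nxt.length) (d + 1)).foldl
            (fun p k => PySem.Dict.modify p k 0 (· + 1)) pts) := by
  intro F
  induction F with
  | nil =>
    intro nxt vis pts d fuel
    simp
  | cons f F ih =>
    intro nxt vis pts d fuel
    have hfuel : fuel + (f :: F).length = (fuel + F.length) + 1 := by
      simp only [List.length_cons]; omega
    rw [hfuel]
    show bfsA maze rows cols ((fuel + F.length) + 1)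
        ((f, d) :: (F.map (fun c => (c, d)) ++ nxt.map (fun c => (c, d + 1)))) (vis ++ nxt) pts = _
    rw [show ∀ q vis' pts', bfsA maze rows cols ((fuel + F.length) + 1) ((f, d) :: q) vis' pts'
        = (fun st => bfsA maze rows cols (fuel + F.length) st.1 st.2.1 st.2.2)
            (stepA maze rows cols f d (q, vis', pts')) from fun _ _ _ => rfl]
    rw [stepA_eq, aStep_fold]
    obtain ⟨t, ht⟩ := bStep_fold_prefix maze rows cols vis (pvNeighbors f) nxt
    have hM : innerB maze rows cols vis nxt f = nxt ++ t := ht.symm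
    simp only
    rw [show (pvNeighbors f).foldl (bStep maze rows cols vis) nxt = innerB maze rows cols vis nxt f from rfl]
    rw [hM]
    have hdrop : (nxt ++ t).drop nxt.length = t := by simp
    have hlen : (nxt ++ t).length - nxt.length = t.length := by
      simp only [List.length_append]; omega
    rw [hdrop, hlen, List.append_assoc, ← List.map_append]
    rw [ih (nxt ++ t) vis
      ((List.replicate t.length (d + 1)).foldl (fun p k => PySem.Dict.modify p k 0 (· + 1)) pts) d fuel]
    have hfold : List.foldl (innerB maze rows cols vis) (nxt ++ t) F
        = List.foldl (innerB maze rows cols vis) nxt (f :: F) := by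
      simp only [List.foldl_cons, hM]
    rw [hfold]
    obtain ⟨w, hw⟩ := innerB_fold_prefix maze rows cols vis (f :: F) nxt
    congr 1
    rw [replicate_fold_compose]
    congr 1
    rw [← hw]
    have hpre : (nxt ++ t) <+: nxt ++ w := by
      rw [hw, ← hfold]
      exact innerB_fold_prefix maze rows cols vis F (nxt ++ t)
    have := hpre.length_le
    simp only [List.length_append] at this ⊢
    congr 1
    omega

def logOf (maze : List String) (rows cols : Int) :
    Nat → Int → List (Int × Int) → List (Int × Int) → List Int
  | 0, _, _, _ => []
  | k + 1, d, vis, F =>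
    List.replicate (nextB maze rows cols vis F).length d
      ++ logOf maze rows cols k (d + 1) (vis ++ nextB maze rows cols vis F)
           (nextB maze rows cols vis F)

def popsOf (maze : List String) (rows cols : Int) :
    Nat → List (Int × Int) → List (Int × Int) → Nat
  | 0, _, _ => 0
  | k + 1, vis, F =>
    F.length + popsOf maze rows cols k (vis ++ nextB maze rows cols vis F)
      (nextB maze rows cols vis F)

def doneL (maze : List String) (rows cols : Int) :
    Nat → List (Int × Int) → List (Int × Int) → Prop
  | 0, _, F => F = []
  | k + 1, vis, F =>
    F = [] ∨ doneL maze rows cols k (vis ++ nextB maze rows cols vis F)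
      (nextB maze rows cols vis F)

theorem nextB_nil (maze : List String) (rows cols : Int) (vis : List (Int × Int)) :
    nextB maze rows cols vis [] = [] := rfl

theorem logOf_nil (maze : List String) (rows cols : Int) :
    ∀ (k : Nat) (d : Int) (vis : List (Int × Int)), logOf maze rows cols k d vis [] = [] := by
  intro k
  induction k with
  | zero => intro d vis; rfl
  | succ k ih =>
    intro d vis
    show List.replicate (nextB maze rows cols vis []).length d ++ _ = _
    rw [nextB_nil]
    simp [ih (d + 1) vis]

theorem doneL_nil (maze : List String) (rows cols : Int) (k : Nat) (vis : List (Int × Int)) :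
    doneL maze rows cols k vis [] := by
  cases k with
  | zero => rfl
  | succ k => exact Or.inl rfl

theorem runA (maze : List String) (rows cols : Int) :
    ∀ (k : Nat) (vis F : List (Int × Int)) (pts : PySem.Dict Int Int) (d : Int) (extra : Nat),
      doneL maze rows cols k vis F →
      bfsA maze rows cols (popsOf maze rows cols k vis F + extra) (F.map (fun c => (c, d))) vis pts
      = (logOf maze rows cols k (d + 1) vis F).foldl
          (fun p key => PySem.Dict.modify p key 0 (· + 1)) pts := by
  intro k
  induction k with
  | zero =>
    intro vis F pts d extra hdone
    have hF : F = [] := hdone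
    subst hF
    simp [popsOf, logOf, bfsA_nil]
  | succ k ih =>
    intro vis F pts d extra hdone
    by_cases hF : F = []
    · subst hF
      rw [logOf_nil]
      simp [bfsA_nil]
    · have hdone' : doneL maze rows cols k (vis ++ nextB maze rows cols vis F)
          (nextB maze rows cols vis F) := by
        rcases hdone with h | h
        · exact absurd h hF
        · exact h
      show bfsA maze rows cols (F.length + popsOf maze rows cols k (vis ++ nextB maze rows cols vis F)
          (nextB maze rows cols vis F) + extra) (F.map (fun c => (c, d))) vis pts = _
      have harr : F.length + popsOf maze rows cols k (vis ++ nextB maze rows cols vis F)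
            (nextB maze rows cols vis F) + extra
          = (popsOf maze rows cols k (vis ++ nextB maze rows cols vis F)
              (nextB maze rows cols vis F) + extra) + F.length := by omega
      rw [harr]
      have hl := levelA maze rows cols F [] vis pts d
        (popsOf maze rows cols k (vis ++ nextB maze rows cols vis F)
          (nextB maze rows cols vis F) + extra)
      simp only [List.map_nil, List.append_nil, List.length_nil, Nat.sub_zero] at hl
      rw [hl]
      rw [show F.foldl (innerB maze rows cols vis) [] = nextB maze rows cols vis F from rfl]
      rw [ih _ _ _ _ _ hdone']
      show _ = (List.replicate (nextB maze rows cols vis F).length (d + 1)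
          ++ logOf maze rows cols k (d + 1 + 1) (vis ++ nextB maze rows cols vis F)
               (nextB maze rows cols vis F)).foldl _ pts
      rw [List.foldl_append]

theorem bStep_fold_mem (maze : List String) (rows cols : Int) (vis : List (Int × Int)) :
    ∀ (ns acc : List (Int × Int)) (x : Int × Int),
      x ∈ ns.foldl (bStep maze rows cols vis) acc →
      x ∈ acc ∨ (PySem.Set.contains vis x = false ∧ 0 ≤ x.1 ∧ x.1 < rows ∧ 0 ≤ x.2 ∧ x.2 < cols) := by
  intro ns
  induction ns with
  | nil => intro acc x h; exact Or.inl h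
  | cons n ns ih =>
    intro acc x h
    rcases ih _ x h with h' | h'
    · unfold bStep at h'
      split at h'
      · rename_i hc
        by_cases hn : PySem.Set.contains acc n = true
        · rw [add_of_contains _ _ hn] at h'; exact Or.inl h'
        · rw [add_of_not_contains _ _ (by simpa using hn)] at h' 
          rcases List.mem_append.mp h' with h'' | h''
          · exact Or.inl h''
          · right
            have hx : x = n := by simpa using h''
            subst hx
            exact ⟨hc.2.2.2.2.2, hc.1, hc.2.1, hc.2.2.1, hc.2.2.2.1⟩
      · exact Or.inl h'
    · exact Or.inr h'

theorem mem_nextB (maze : List String) (rows cols : Int) (vis F : List (Int × Int))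
    (x : Int × Int) (h : x ∈ nextB maze rows cols vis F) :
    PySem.Set.contains vis x = false ∧ 0 ≤ x.1 ∧ x.1 < rows ∧ 0 ≤ x.2 ∧ x.2 < cols := by
  rw [nextB_eq] at h
  -- innerB folds are bStep folds; iterate membership down to the empty accumulator
  suffices hs : ∀ (G acc : List (Int × Int)),
      (∀ y ∈ acc, PySem.Set.contains vis y = false ∧ 0 ≤ y.1 ∧ y.1 < rows ∧ 0 ≤ y.2 ∧ y.2 < cols) →
      ∀ y ∈ G.foldl (innerB maze rows cols vis) acc,
        PySem.Set.contains vis y = false ∧ 0 ≤ y.1 ∧ y.1 < rows ∧ 0 ≤ y.2 ∧ y.2 < cols by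
    exact hs F [] (by intro y hy; cases hy) x h
  intro G
  induction G with
  | nil => intro acc hacc y hy; exact hacc y hy
  | cons g G ihg =>
    intro acc hacc y hy
    refine ihg _ ?_ y hy
    intro z hz
    rcases bStep_fold_mem maze rows cols vis (pvNeighbors g) acc z hz with h' | h'
    · exact hacc z h'
    · exact h'

theorem bStep_fold_nodup (maze : List String) (rows cols : Int) (vis : List (Int × Int)) :
    ∀ (ns acc : List (Int × Int)), acc.Nodup → (ns.foldl (bStep maze rows cols vis) acc).Nodup := by
  intro ns
  induction ns with
  | nil => intro acc h; exact h
  | cons n ns ih =>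
    intro acc h
    refine ih _ ?_
    unfold bStep
    split
    · by_cases hn : PySem.Set.contains acc n = true
      · rw [add_of_contains _ _ hn]; exact h
      · rw [add_of_not_contains _ _ (by simpa using hn)]
        refine List.Nodup.append h (List.nodup_singleton n) ?_
        intro a ha hb
        have : a = n := by simpa using hb
        subst this
        exact (contains_false_iff acc a).mp (by simpa using hn) ha
    · exact h

theorem nodup_nextB (maze : List String) (rows cols : Int) (vis F : List (Int × Int)) :
    (nextB maze rows cols vis F).Nodup := by
  rw [nextB_eq]
  suffices hs : ∀ (G acc : List (Int × Int)), acc.Nodup →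
      (G.foldl (innerB maze rows cols vis) acc).Nodup by
    exact hs F [] List.nodup_nil
  intro G
  induction G with
  | nil => intro acc h; exact h
  | cons g G ihg =>
    intro acc h
    exact ihg _ (bStep_fold_nodup maze rows cols vis (pvNeighbors g) acc h)

theorem union_eq_append (s : List (Int × Int)) :
    ∀ (t : List (Int × Int)), t.Nodup → (∀ x ∈ t, PySem.Set.contains s x = false) →
      PySem.Set.union s t = s ++ t := by
  suffices hs : ∀ (t s' : List (Int × Int)), t.Nodup → (∀ x ∈ t, PySem.Set.contains s' x = false) →
      t.foldl PySem.Set.add s' = s' ++ t by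
    intro t h1 h2
    have : PySem.Set.union s t = t.foldl PySem.Set.add s := by
      simp [PySem.Set.union, PySem.Set.update]
    rw [this]
    exact hs t s h1 h2
  intro t
  induction t with
  | nil => intro s' _ _; simp
  | cons n t ih =>
    intro s' hnd hfr
    rw [List.foldl_cons, add_of_not_contains _ _ (hfr n List.mem_cons_self)]
    rw [ih (s' ++ [n]) hnd.of_cons ?_]
    · simp
    · intro x hx
      rw [contains_append]
      rw [hfr x (List.mem_cons_of_mem _ hx)]
      have hxn : x ≠ n := by
        intro hxe; subst hxe
        exact (List.nodup_cons.mp hnd).1 hx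
      have : PySem.Set.contains [n] x = false := by
        rw [contains_false_iff]
        simpa using hxn
      rw [this]
      rfl

theorem runB (maze : List String) (rows cols : Int) :
    ∀ (k : Nat) (d : Int) (vis F : List (Int × Int)) (total : Int), d + k ≤ 65 →
      loopB maze rows cols k d vis F total
      = total + ((logOf maze rows cols k d vis F).countP
          (fun x => decide (x ≤ 64 ∧ x % 2 = 0)) : Int) := by
  intro k
  induction k with
  | zero => intro d vis F total _; simp [loopB, logOf]
  | succ k ih =>
    intro d vis F total hd
    show (if F.isEmpty then total
      else loopB maze rows cols k (d + 1) (PySem.Set.union vis (nextB maze rows cols vis F))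
        (nextB maze rows cols vis F)
        (if d % 2 = 0 then total + ((nextB maze rows cols vis F).length : Int) else total)) = _
    by_cases hF : F.isEmpty
    · rw [if_pos hF]
      have : F = [] := by simpa [List.isEmpty_iff] using hF
      subst this
      rw [logOf_nil]
      simp
    · rw [if_neg hF]
      have hun : PySem.Set.union vis (nextB maze rows cols vis F)
          = vis ++ nextB maze rows cols vis F :=
        union_eq_append vis _ (nodup_nextB maze rows cols vis F)
          (fun x hx => (mem_nextB maze rows cols vis F x hx).1)
      rw [hun, ih (d + 1) _ _ _ (by push_cast at hd ⊢; omega)]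
      show _ = total + ((List.replicate (nextB maze rows cols vis F).length d
          ++ logOf maze rows cols k (d + 1) (vis ++ nextB maze rows cols vis F)
               (nextB maze rows cols vis F)).countP (fun x => decide (x ≤ 64 ∧ x % 2 = 0)) : Int)
      rw [List.countP_append, List.countP_replicate]
      have hd64 : d ≤ 64 := by push_cast at hd; omega
      by_cases hpar : d % 2 = 0
      · rw [if_pos hpar]
        have : (decide (d ≤ 64 ∧ d % 2 = 0)) = true := by
          rw [decide_eq_true_iff]; exact ⟨hd64, hpar⟩
        rw [this]
        simp
        ring
      · rw [if_neg hpar]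
        have : (decide (d ≤ 64 ∧ d % 2 = 0)) = false := by
          rw [decide_eq_false_iff_not]
          intro h; exact hpar h.2
        rw [this]
        simp

def rectL (rows cols : Int) : List (Int × Int) :=
  ((List.range rows.toNat) ×ˢ (List.range cols.toNat)).map (fun p => ((p.1 : Int), (p.2 : Int)))

def muOf (rows cols : Int) (vis : List (Int × Int)) : Nat :=
  ((rectL rows cols).filter (fun x => decide (x ∉ vis))).length

theorem mem_rectL (rows cols : Int) (x : Int × Int) :
    x ∈ rectL rows cols ↔ 0 ≤ x.1 ∧ x.1 < rows ∧ 0 ≤ x.2 ∧ x.2 < cols := by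
  unfold rectL
  rcases x with ⟨a, b⟩
  simp only [List.mem_map, List.mem_product, List.mem_range, Prod.mk.injEq, Prod.exists]
  constructor
  · rintro ⟨r, c, ⟨hr, hc⟩, rfl, rfl⟩
    refine ⟨Int.natCast_nonneg r, ?_, Int.natCast_nonneg c, ?_⟩ <;> omega
  · rintro ⟨h1, h2, h3, h4⟩
    exact ⟨a.toNat, b.toNat, ⟨by omega, by omega⟩, by omega, by omega⟩

theorem nodup_rectL (rows cols : Int) : (rectL rows cols).Nodup := by
  unfold rectL
  refine List.Nodup.map ?_ (List.Nodup.product (List.nodup_range) (List.nodup_range))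
  intro p q h
  rcases p with ⟨p1, p2⟩; rcases q with ⟨q1, q2⟩
  simp only [Prod.mk.injEq] at h
  have : p1 = q1 := by omega
  have : p2 = q2 := by omega
  simp_all

theorem mu_add (maze : List String) (rows cols : Int) (vis F : List (Int × Int)) :
    muOf rows cols (vis ++ nextB maze rows cols vis F) + (nextB maze rows cols vis F).length
      = muOf rows cols vis := by
  set N := nextB maze rows cols vis F with hN
  unfold muOf
  have hsplit : (rectL rows cols).filter (fun x => decide (x ∉ vis ++ N))
      = ((rectL rows cols).filter (fun x => decide (x ∉ vis))).filter (fun x => decide (x ∉ N)) := by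
    rw [List.filter_filter]
    apply List.filter_congr
    intro x _
    simp only [List.mem_append, decide_not, ← Bool.not_or]
    congr 1
    rw [Bool.or_comm]
    simp
  rw [hsplit]
  set L := (rectL rows cols).filter (fun x => decide (x ∉ vis)) with hL
  have hLnodup : L.Nodup := (nodup_rectL rows cols).filter _
  have hNL : ∀ n ∈ N, n ∈ L := by
    intro n hn
    obtain ⟨hfr, h1, h2, h3, h4⟩ := mem_nextB maze rows cols vis F n hn
    rw [hL, List.mem_filter]
    refine ⟨(mem_rectL rows cols n).mpr ⟨h1, h2, h3, h4⟩, ?_⟩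
    simp only [decide_eq_true_eq]
    exact (contains_false_iff vis n).mp hfr
  have hcount : L.countP (fun x => decide (x ∈ N)) = N.length := by
    rw [List.countP_eq_length_filter]
    have hperm : (L.filter (fun x => decide (x ∈ N))).Perm N := by
      rw [List.perm_ext_iff_of_nodup (hLnodup.filter _) (by rw [hN]; exact nodup_nextB maze rows cols vis F)]
      intro a
      rw [List.mem_filter]
      simp only [decide_eq_true_eq]
      constructor
      · exact fun h => h.2
      · exact fun h => ⟨hNL a h, h⟩
    exact hperm.length_eq
  have hsplit2 := List.length_eq_countP_add_countP (fun x => decide (x ∈ N)) (l := L)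
  have heq : L.countP (fun a => decide ¬(decide (a ∈ N)) = true)
      = (L.filter (fun x => decide (x ∉ N))).length := by
    rw [List.countP_eq_length_filter]
    congr 1
    apply List.filter_congr
    intro x _
    simp
  omega

theorem done_of_lt (maze : List String) (rows cols : Int) :
    ∀ (k : Nat) (vis F : List (Int × Int)), muOf rows cols vis < k → doneL maze rows cols k vis F := by
  intro k
  induction k with
  | zero => intro vis F h; omega
  | succ k ih =>
    intro vis F h
    by_cases hN : nextB maze rows cols vis F = []
    · right
      rw [hN]
      exact doneL_nil maze rows cols k _
    · right
      refine ih _ _ ?_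
      have := mu_add maze rows cols vis F
      have hlen : (nextB maze rows cols vis F).length ≠ 0 := by
        simpa [List.length_eq_zero_iff] using hN
      omega

theorem pops_le (maze : List String) (rows cols : Int) :
    ∀ (k : Nat) (vis F : List (Int × Int)),
      popsOf maze rows cols k vis F ≤ F.length + muOf rows cols vis := by
  intro k
  induction k with
  | zero => intro vis F; exact Nat.zero_le _
  | succ k ih =>
    intro vis F
    show F.length + popsOf maze rows cols k (vis ++ nextB maze rows cols vis F)
        (nextB maze rows cols vis F) ≤ _
    have h1 := ih (vis ++ nextB maze rows cols vis F) (nextB maze rows cols vis F)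
    have h2 := mu_add maze rows cols vis F
    omega

theorem mu_empty_le (rows cols : Int) : muOf rows cols [] ≤ rows.toNat * cols.toNat := by
  unfold muOf
  calc ((rectL rows cols).filter _).length ≤ (rectL rows cols).length := List.length_filter_le _ _
    _ = rows.toNat * cols.toNat := by
        unfold rectL
        rw [List.length_map, List.length_product, List.length_range, List.length_range]

theorem logOf_mem_ge (maze : List String) (rows cols : Int) :
    ∀ (k : Nat) (d : Int) (vis F : List (Int × Int)) (x : Int),
      x ∈ logOf maze rows cols k d vis F → d ≤ x := by
  intro k
  induction k with
  | zero => intro d vis F x h; cases h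
  | succ k ih =>
    intro d vis F x h
    rcases List.mem_append.mp h with h' | h'
    · rw [List.eq_of_mem_replicate h']
    · have := ih (d + 1) _ _ x h'
      omega

theorem countP_logOf_ge65 (maze : List String) (rows cols : Int)
    (k : Nat) (d : Int) (vis F : List (Int × Int)) (hd : 65 ≤ d) :
    (logOf maze rows cols k d vis F).countP (fun x => decide (x ≤ 64 ∧ x % 2 = 0)) = 0 := by
  rw [List.countP_eq_zero]
  intro x hx
  have := logOf_mem_ge maze rows cols k d vis F x hx
  simp only [decide_eq_true_eq]
  intro h
  omega

theorem logOf_stable (maze : List String) (rows cols : Int) :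
    ∀ (k j : Nat) (d : Int) (vis F : List (Int × Int)),
      doneL maze rows cols k vis F →
      logOf maze rows cols (k + j) d vis F = logOf maze rows cols k d vis F := by
  intro k
  induction k with
  | zero =>
    intro j d vis F hdone
    have hF : F = [] := hdone
    subst hF
    rw [logOf_nil]
    rfl
  | succ k ih =>
    intro j d vis F hdone
    rcases hdone with hF | hdone'
    · subst hF
      rw [logOf_nil, logOf_nil]
    · rw [show k + 1 + j = (k + j) + 1 by omega]
      show List.replicate (nextB maze rows cols vis F).length d
          ++ logOf maze rows cols (k + j) (d + 1) (vis ++ nextB maze rows cols vis F)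
               (nextB maze rows cols vis F) = _
      rw [ih j (d + 1) _ _ hdone']
      rfl

theorem countP_logOf_trunc (maze : List String) (rows cols : Int) :
    ∀ (k k' : Nat) (d : Int) (vis F : List (Int × Int)),
      65 ≤ d + k → 65 ≤ d + k' →
      (logOf maze rows cols k d vis F).countP (fun x => decide (x ≤ 64 ∧ x % 2 = 0))
      = (logOf maze rows cols k' d vis F).countP (fun x => decide (x ≤ 64 ∧ x % 2 = 0)) := by
  intro k
  induction k with
  | zero =>
    intro k' d vis F h1 h2
    rw [show logOf maze rows cols 0 d vis F = [] from rfl]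
    rw [countP_logOf_ge65 maze rows cols k' d vis F (by push_cast at h1; omega)]
    rfl
  | succ k ih =>
    intro k' d vis F h1 h2
    cases k' with
    | zero =>
      rw [show logOf maze rows cols 0 d vis F = [] from rfl]
      rw [countP_logOf_ge65 maze rows cols (k + 1) d vis F (by push_cast at h2; omega)]
      rfl
    | succ k' =>
      show (List.replicate (nextB maze rows cols vis F).length d ++ _).countP _
          = (List.replicate (nextB maze rows cols vis F).length d ++ _).countP _
      rw [List.countP_append, List.countP_append]
      rw [ih k' (d + 1) _ _ (by push_cast at h1 ⊢; omega) (by push_cast at h2 ⊢; omega)]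

theorem foldl_if_sum :
    ∀ (l : List (Int × Int)) (a : Int),
      l.foldl (fun a kv => if kv.1 ≤ 64 ∧ kv.1 % 2 = 0 then a + kv.2 else a) a
      = a + ((l.filter (fun kv => decide (kv.1 ≤ 64 ∧ kv.1 % 2 = 0))).map (fun kv => kv.2)).sum := by
  intro l
  induction l with
  | nil => intro a; simp
  | cons kv l ih =>
    intro a
    rw [List.foldl_cons]
    by_cases h : kv.1 ≤ 64 ∧ kv.1 % 2 = 0
    · rw [if_pos h, ih]
      rw [List.filter_cons_of_pos (by simpa using h)]
      simp only [List.map_cons, List.sum_cons]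
      ring
    · rw [if_neg h, ih]
      rw [List.filter_cons_of_neg (by simpa using h)]

-- Σ_{k ∈ K, k even ≤ 64} count L k  =  countP (even ≤ 64) L,  for K ⊇ L nodup
theorem sum_count_aux :
    ∀ (L : List Int) (K : List Int), K.Nodup → (∀ y ∈ L, y ∈ K) →
      ((K.filter (fun k => decide (k ≤ 64 ∧ k % 2 = 0))).map (fun k => (L.count k : Int))).sum
      = (L.countP (fun x => decide (x ≤ 64 ∧ x % 2 = 0)) : Int) := by
  have hb : ∀ (x : Int) (L : List Int) (K : List Int), K.Nodup →
      ((K.filter (fun k => decide (k ≤ 64 ∧ k % 2 = 0))).map (fun k => ((x :: L).count k : Int))).sum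
      = ((K.filter (fun k => decide (k ≤ 64 ∧ k % 2 = 0))).map (fun k => (L.count k : Int))).sum
        + (if (x ≤ 64 ∧ x % 2 = 0) ∧ x ∈ K then 1 else 0) := by
    intro x L K
    induction K with
    | nil => intro _; simp
    | cons a K ihK =>
      intro hnd
      by_cases hca : (a ≤ 64 ∧ a % 2 = 0)
      · rw [List.filter_cons_of_pos (by simpa using hca)]
        simp only [List.map_cons, List.sum_cons]
        rw [ihK hnd.of_cons]
        by_cases hxa : x = a
        · subst hxa
          have hxK : x ∉ K := (List.nodup_cons.mp hnd).1
          rw [List.count_cons_self]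
          have h2 : ((x ≤ 64 ∧ x % 2 = 0) ∧ x ∈ K) = False := by
            simp [hxK]
          have h3 : ((x ≤ 64 ∧ x % 2 = 0) ∧ x ∈ x :: K) = True := by
            simp [hca]
          simp only [h2, h3, if_true, if_false]
          push_cast
          ring
        · rw [List.count_cons_of_ne hxa]
          have h3 : ((x ≤ 64 ∧ x % 2 = 0) ∧ x ∈ a :: K) = ((x ≤ 64 ∧ x % 2 = 0) ∧ x ∈ K) := by
            simp [hxa]
          simp only [h3]
          ring
      · rw [List.filter_cons_of_neg (by simpa using hca)]
        rw [ihK hnd.of_cons]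
        by_cases hxa : x = a
        · subst hxa
          have h3 : ((x ≤ 64 ∧ x % 2 = 0) ∧ x ∈ x :: K) = ((x ≤ 64 ∧ x % 2 = 0) ∧ x ∈ K) := by
            apply propext
            constructor <;> (rintro ⟨hc, _⟩; exact absurd hc hca)
          simp only [h3]
        · have h3 : ((x ≤ 64 ∧ x % 2 = 0) ∧ x ∈ a :: K) = ((x ≤ 64 ∧ x % 2 = 0) ∧ x ∈ K) := by
            simp [hxa]
          simp only [h3]
  intro L
  induction L with
  | nil =>
    intro K _ _
    simp
  | cons x L ihL =>
    intro K hnd hmem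
    rw [hb x L K hnd]
    rw [ihL K hnd (fun y hy => hmem y (List.mem_cons_of_mem _ hy))]
    rw [List.countP_cons]
    have hxK : x ∈ K := hmem x List.mem_cons_self
    by_cases hcx : (x ≤ 64 ∧ x % 2 = 0)
    · rw [if_pos ⟨hcx, hxK⟩]
      have : (decide (x ≤ 64 ∧ x % 2 = 0)) = true := by simpa using hcx
      rw [this]
      simp only [if_true]
      push_cast
      ring
    · rw [if_neg (by tauto)]
      have : (decide (x ≤ 64 ∧ x % 2 = 0)) = false := by simpa using hcx
      rw [this]
      simp

theorem sumEven_counter (L : List Int) :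
    (PySem.Dict.counter L).items.foldl
      (fun a kv => if kv.1 ≤ 64 ∧ kv.1 % 2 = 0 then a + kv.2 else a) 0
    = (L.countP (fun x => decide (x ≤ 64 ∧ x % 2 = 0)) : Int) := by
  rw [foldl_if_sum, PySem.Dict.items_counter, List.filter_map, List.map_map]
  have h := sum_count_aux L (PySem.Set.ofList L) (PySem.Set.nodup_ofList L)
    (fun y hy => (PySem.Set.mem_ofList L y).mpr hy)
  simpa [Function.comp] using h

theorem find_prod (p : Nat → Nat → Bool) :
    ∀ (l1 l2 : List Nat),
      ((l1.flatMap (fun r => l2.map (fun c => (r, c)))).find? (fun rc => p rc.1 rc.2))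
      = l1.findSome? (fun r => ((l2.find? (fun c => p r c)).map (fun c => (r, c)))) := by
  intro l1
  induction l1 with
  | nil => intro l2; rfl
  | cons r l1 ih =>
    intro l2
    rw [List.flatMap_cons, List.find?_append, List.find?_map, List.findSome?_cons, ih l2]
    cases h : l2.find? (fun c => p r c) with
    | none =>
      have h' : l2.find? ((fun (rc : Nat × Nat) => p rc.1 rc.2) ∘ (fun c => (r, c))) = none := h
      rw [h']
      simp
    | some c =>
      have h' : l2.find? ((fun (rc : Nat × Nat) => p rc.1 rc.2) ∘ (fun c => (r, c))) = some c := h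
      rw [h']
      simp

theorem findS_eq_getS (maze : List String) : findS maze = getS maze := by
  unfold findS getS
  exact find_prod (fun r c => pvCell maze (Int.ofNat r) (Int.ofNat c) == 'S') _ _

theorem core_eq (maze : List String) (rows cols : Int) (s : Int × Int) :
    (bfsA maze rows cols (rows.toNat * cols.toNat + 1) [(s, 0)] PySem.Set.empty
        PySem.Dict.empty).items.foldl
      (fun a kv => if kv.1 ≤ 64 ∧ kv.1 % 2 = 0 then a + kv.2 else a) 0
    = loopB maze rows cols 64 1 PySem.Set.empty (PySem.Set.ofList [s]) 0 := by
  set K := muOf rows cols [] + 1 with hK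
  have hdone := done_of_lt maze rows cols K [] [s] (by omega)
  have hpops : popsOf maze rows cols K [] [s] ≤ rows.toNat * cols.toNat + 1 := by
    have h1 := pops_le maze rows cols K [] [s]
    have h2 := mu_empty_le rows cols
    simp only [List.length_cons, List.length_nil] at h1
    omega
  obtain ⟨extra, hextra⟩ := Nat.le.dest hpops
  have hA := runA maze rows cols K [] [s] PySem.Dict.empty 0 extra hdone
  rw [hextra] at hA
  have hq : ([s].map (fun c => (c, (0 : Int)))) = [(s, 0)] := rfl
  rw [hq] at hA
  norm_num at hA
  have hA' : bfsA maze rows cols (rows.toNat * cols.toNat + 1) [(s, 0)] PySem.Set.empty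
      PySem.Dict.empty
      = (logOf maze rows cols K 1 [] [s]).foldl
          (fun p key => PySem.Dict.modify p key 0 (· + 1)) PySem.Dict.empty := by
    rw [← hA]
    rfl
  rw [hA']
  rw [show (logOf maze rows cols K 1 [] [s]).foldl
        (fun p key => PySem.Dict.modify p key 0 (· + 1)) PySem.Dict.empty
      = PySem.Dict.counter (logOf maze rows cols K 1 [] [s]) from
        (PySem.Dict.counter_eq_foldl _).symm]
  rw [sumEven_counter]
  have hB := runB maze rows cols 64 1 PySem.Set.empty (PySem.Set.ofList [s]) 0 (by norm_num)
  rw [show PySem.Set.ofList [s] = [s] from rfl] at hB ⊢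
  rw [hB]
  have hstable : logOf maze rows cols (K + 64) 1 [] [s] = logOf maze rows cols K 1 [] [s] :=
    logOf_stable maze rows cols K 64 1 [] [s] hdone
  have htrunc := countP_logOf_trunc maze rows cols (K + 64) 64 1 [] [s]
    (by push_cast; omega) (by norm_num)
  rw [← hstable, htrunc]
  simp

theorem part_one_eq_alt (maze : List String) : part_one maze = part_one_alt maze := by
  unfold part_one part_one_alt
  rw [findS_eq_getS]
  cases hS : getS maze with
  | none => rfl
  | some rc =>
    obtain ⟨sr, sc⟩ := rc
    simp only
    exact core_eq maze (maze.length : Int) ((maze.headD "").length : Int) ((sr : Int), (sc : Int))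

-- ===== VERDICT (by name: the statement is the Claim_ definition above) =====
theorem part_one_spec : Claim_equal_part_one := by
  intro maze _ _
  unfold Spec_part_one
  exact part_one_eq_alt maze
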